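-- pv_equiv track=rewrite | github.com/AlexMurinets/crypto | py_microserv.py | normalize_float
-- ===== SOURCE A (Python) =====
-- def normalize_float(s):
--     res = s
--     indx = res.find('.')
--     while indx != -1:
--         res = res[:indx] + res[indx+1:]
--         indx = res.find('.')
--     res = res.replace(',', '.')
--     return res
-- ===== SOURCE B (Python) =====
-- def normalize_float(s):
--     return ''.join('.' if c == ',' else c for c in s if c != '.')
-- ===== Notes on version B (the rewrite author's own statement) =====
-- stated objective: simpler
-- what changed: Replaces A's repeated find-and-splice loop over the string plus a separate replace pass with one linear comprehension that drops every dot and maps each comma to a dot.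
import Mathlib
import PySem

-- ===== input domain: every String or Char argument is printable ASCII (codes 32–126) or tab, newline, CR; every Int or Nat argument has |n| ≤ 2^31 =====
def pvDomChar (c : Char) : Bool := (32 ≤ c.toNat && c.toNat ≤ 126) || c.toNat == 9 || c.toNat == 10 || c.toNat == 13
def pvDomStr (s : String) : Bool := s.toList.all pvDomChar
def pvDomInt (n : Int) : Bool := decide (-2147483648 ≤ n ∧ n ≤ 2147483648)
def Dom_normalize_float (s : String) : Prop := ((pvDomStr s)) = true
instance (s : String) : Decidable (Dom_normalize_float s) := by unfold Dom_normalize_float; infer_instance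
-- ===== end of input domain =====

-- B builds the result in one linear pass (drop dots, map commas to dots) instead of A's repeated find-and-splice loop plus replace pass; same return value.

-- ===== PORT A =====
-- the while loop: indx = res.find('.'); while indx != -1: res = res[:indx] + res[indx+1:]; indx = res.find('.')
def normAWhile (res : List Char) : List Char :=
  let indx := PySem.Chars.find res ['.']
  if h : indx = -1 then res
  else
    normAWhile (PySem.Chars.slice res none (some indx) ++ PySem.Chars.slice res (some (indx + 1)) none)
termination_by res.length
decreasing_by
  have h0 : 0 ≤ PySem.Chars.find res ['.'] := by
    rcases (lt_or_eq_of_le (PySem.Chars.neg_one_le_find res ['.'])) with h' | h'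
    · omega
    · exact absurd h'.symm h
  have hpre := (PySem.Chars.find_spec h0).1
  have hlt : (PySem.Chars.find res ['.']).toNat < res.length := by
    have := hpre.length_le
    simp at this
    omega
  simp [PySem.Chars.slice_eq_listSlice, PySem.List.slice_to res h0,
        PySem.List.slice_from res (by omega : (0:Int) ≤ PySem.Chars.find res ['.'] + 1)]
  omega

def normalize_float (s : String) : String :=
  let res := normAWhile s.toList
  String.ofList (PySem.Chars.replace res [','] ['.'])

-- ===== PORT B =====
def normalize_float_alt (s : String) : String :=
  String.ofList ((s.toList.filter (fun c => c ≠ '.')).map (fun c => if c = ',' then '.' else c))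

-- ===== PRECONDITION & SPEC =====
def Spec_normalize_float (s : String) (out : String) : Prop := out = normalize_float_alt s
instance (s : String) (out : String) : Decidable (Spec_normalize_float s out) := by unfold Spec_normalize_float; infer_instance

-- ===== CLAIM (what is proved, stated in full; the proofs are below) =====
def Claim_equal_normalize_float : Prop := ∀ (s : String), Dom_normalize_float s → Spec_normalize_float s (normalize_float s)

-- ===== LEMMAS AND PROOFS =====

lemma singleton_infix_iff (a : Char) (l : List Char) : [a] <:+: l ↔ a ∈ l := by
  constructor
  · intro h; exact h.mem (by simp)
  · intro h
    rcases List.mem_iff_append.mp h with ⟨p, q, rfl⟩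
    exact ⟨p, q, by simp⟩

lemma normAWhile_eq_filter (res : List Char) :
    normAWhile res = res.filter (fun c => c ≠ '.') := by
  induction res using (fun motive ih res => Nat.strongRecOn (motive := fun n => ∀ l : List Char, l.length = n → motive l)
      res.length (fun n ih' l hl => ih l (fun m hm => ih' m.length (hl ▸ hm) m rfl)) res rfl :
      ∀ (motive : List Char → Prop),
        (∀ l : List Char, (∀ m : List Char, m.length < l.length → motive m) → motive l) →
        ∀ l, motive l) with
  | _ res ih =>
    rw [normAWhile.eq_def]
    by_cases h : PySem.Chars.find res ['.'] = -1
    · simp only [h, dite_true]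
      have hnd : '.' ∉ res := by
        intro hm
        exact (PySem.Chars.find_eq_neg_one_iff res ['.']).mp h ((singleton_infix_iff _ _).mpr hm)
      rw [List.filter_eq_self.mpr]
      intro c hc; simp; rintro rfl; exact hnd hc
    · simp only [h, dite_false]
      have h0 : 0 ≤ PySem.Chars.find res ['.'] := by
        rcases (lt_or_eq_of_le (PySem.Chars.neg_one_le_find res ['.'])) with h' | h'
        · omega
        · exact absurd h'.symm h
      obtain ⟨hpre, hmin⟩ := PySem.Chars.find_spec h0
      set i := (PySem.Chars.find res ['.']).toNat with hi
      have hlt : i < res.length := by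
        have := hpre.length_le; simp at this; omega
      have hget : res.drop i = '.' :: res.drop (i + 1) := by
        rcases hpre with ⟨t, ht⟩
        rw [← ht]; simp
        have : res.drop (i+1) = (res.drop i).drop 1 := by rw [List.drop_drop]
        rw [this, ← ht]; simp
      have hrw : PySem.Chars.slice res none (some (PySem.Chars.find res ['.'])) ++
          PySem.Chars.slice res (some (PySem.Chars.find res ['.'] + 1)) none
          = res.take i ++ res.drop (i + 1) := by
        simp [PySem.Chars.slice_eq_listSlice, PySem.List.slice_to res h0,
              PySem.List.slice_from res (by omega : (0:Int) ≤ PySem.Chars.find res ['.'] + 1), ← hi]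
        congr 1
        omega
      rw [hrw, ih _ (by simp; omega)]
      have htake : (res.take i).filter (fun c => c ≠ '.') = res.take i := by
        apply List.filter_eq_self.mpr
        intro c hc
        simp only [decide_eq_true_eq, ne_eq]
        intro rfl_c
        rcases List.mem_take_iff_getElem.mp hc with ⟨j, hj, hjc⟩
        apply hmin j (by omega)
        refine ⟨res.drop (j+1), ?_⟩
        have : res.drop j = res[j] :: res.drop (j+1) := List.drop_eq_getElem_cons (by omega)
        simp [this, hjc, rfl_c]
      calc (res.take i ++ res.drop (i + 1)).filter (fun c => c ≠ '.')
          = (res.take i).filter (fun c => c ≠ '.') ++ (res.drop (i + 1)).filter (fun c => c ≠ '.') := by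
            rw [List.filter_append]
        _ = res.filter (fun c => c ≠ '.') := by
            rw [htake]
            conv_rhs => rw [← List.take_append_drop i res, List.filter_append, htake, hget]
            simp

lemma replace_go_single (b : Char) (fuel : Nat) :
    ∀ (l acc : List Char), l.length ≤ fuel →
    PySem.Chars.replace.go [','] [b] fuel l acc
      = acc.reverse ++ l.map (fun c => if c = ',' then b else c) := by
  induction fuel with
  | zero =>
    intro l acc h
    have : l = [] := List.eq_nil_of_length_eq_zero (by omega)
    subst this
    simp [PySem.Chars.replace.go]
  | succ n ih =>
    intro l acc h
    cases l with
    | nil => simp [PySem.Chars.replace.go]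
    | cons c t =>
      rw [PySem.Chars.replace.go]
      by_cases hc : c = ','
      · subst hc
        have : List.isPrefixOf [','] (',' :: t) = true := by simp [List.isPrefixOf]
        simp only [this, if_true]
        simp only [List.drop_succ_cons, List.length_cons, List.length_nil, List.drop_zero,
          List.reverse_singleton, List.singleton_append]
        rw [ih t (b :: acc) (by simp at h; omega)]
        simp
      · rw [if_neg (by simp [List.isPrefixOf]; exact fun hh => hc hh.symm)]
        rw [ih t (c :: acc) (by simp at h; omega)]
        simp [hc]

lemma replace_single_comma (l : List Char) :
    PySem.Chars.replace l [','] ['.'] = l.map (fun c => if c = ',' then '.' else c) := by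
  rw [PySem.Chars.replace]
  simp only [List.isEmpty_cons]
  simpa using replace_go_single '.' l.length l [] le_rfl

-- ===== VERDICT (by name: the statement is the Claim_ definition above) =====
theorem normalize_float_spec : Claim_equal_normalize_float := by
  intro s _
  simp only [Spec_normalize_float, normalize_float, normalize_float_alt,
    normAWhile_eq_filter, replace_single_comma]
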